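-- pv_equiv track=rewrite | github.com/Pharallaxe/algorithms | ascii/montagne/montagne.py | montagne_commentee
-- ===== SOURCE A (Python) =====
-- def montagne_commentee(sommets):
--
--     # Initialiser une liste paysage.
--     paysage = []
--
--     # Identifier le plus haut des sommets
--     max_el = max(sommets)
--
--     # Identifier le nombre de sommets.
--     longueur = len(sommets)
--
--     # De 0 à max,
--     # ou du sol au plus haut des sommets,
--     for j in range(max_el + 1):
--
--         # Initialiser une nouvelle ligne.
--         ligne = ""
--
--         # De 0 au nombre de sommets,
--         # ou pour chaque sommet,
--         for i in range(0, longueur):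
--
--             # récupérer le sommet courant.
--             el = sommets[i]
--
--             # Si le sommet en cours est plus
--             # petit que le plus hauts des sommets
--             if el < j + 1:
--
--                 # Ajouter 2 * el " " à ligne.
--                 ligne += " " * (2 * el)
--
--             # Sinon
--             else:
--
--                 # Ajouter j espaces à la ligne.
--                 ligne += " " * j
--
--                 # Ajouter "/" à la ligne.
--                 ligne += "/"
--
--                 # Ajouter 2*(el-j-1) espaces à
--                 # la ligne.
--                 ligne += " " * (2 * (el - j - 1))
--
--                 # Ajouter "\" à la ligne.
--                 ligne += "\\"
--
--                 # Ajouter j espaces à la ligne.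
--                 ligne += " " * j
--
--         # Ajouter la ligne sans espaces à la fin
--         # au paysage.
--         paysage.append(ligne.rstrip())
--
--     # Renverser l'ensemble du paysage.
--     paysage = reversed(paysage)
--
--     # Ajouter un saut à la ligne à chaque ligne.
--     paysage = "\n".join(paysage)
--
--     # Retourner le paysage.
--     return paysage
-- ===== SOURCE B (Python) =====
-- def montagne_commentee(sommets):
--     # Grid-based rendering: compute each peak's column offset once, paint '/' and '\'
--     # strokes into a 2D grid of spaces (one bytearray row per height level),
--     # then read the rows top-down.
--     max_el = max(sommets)
--     width = sum(2 * el for el in sommets if el > 0)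
--     grid = [bytearray(b" ") * width for _ in range(max_el + 1)]
--     off = 0
--     for el in sommets:
--         for j in range(el):
--             grid[j][off + j] = 0x2F          # "/"
--             grid[j][off + 2 * el - j - 1] = 0x5C  # "\"
--         if el > 0:
--             off += 2 * el
--     return "\n".join(row.decode("ascii").rstrip() for row in reversed(grid))
-- ===== Notes on version B (the rewrite author's own statement) =====
-- stated objective: alternative
-- what changed: Replaces A's row-major string concatenation (for each row, re-scan all peaks and append space/slash segments) by a 2D character grid: peak offsets are computed once as cumulative widths, each peak paints its '/' and '\' strokes directly into a grid of space-filled bytearray rows, and the rows are read top-down, joined and rstripped at the end.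
-- outside the precondition, e.g. on montagne_commentee([]): A raises ValueError, B raises ValueError
import Mathlib
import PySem

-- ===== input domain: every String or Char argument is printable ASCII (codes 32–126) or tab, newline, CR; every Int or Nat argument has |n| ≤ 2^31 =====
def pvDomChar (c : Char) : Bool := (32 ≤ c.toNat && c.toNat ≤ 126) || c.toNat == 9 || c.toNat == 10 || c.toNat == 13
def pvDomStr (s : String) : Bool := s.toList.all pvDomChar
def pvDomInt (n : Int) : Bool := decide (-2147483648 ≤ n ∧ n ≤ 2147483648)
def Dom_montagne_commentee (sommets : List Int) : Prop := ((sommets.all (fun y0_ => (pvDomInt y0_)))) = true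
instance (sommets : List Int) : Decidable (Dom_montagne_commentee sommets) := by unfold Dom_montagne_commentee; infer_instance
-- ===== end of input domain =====

-- B renders the mountain by painting strokes into a 2D grid instead of A's row-by-row string concatenation (objective: alternative decomposition).

-- ===== PORT A =====
def montagne_commentee (sommets : List Int) : String :=
  -- max(sommets): Python raises ValueError on []; Pre_ excludes that input
  match PySem.List.max? sommets (fun y => y) with
  | none => ""
  | some max_el =>
    let longueur : Int := PySem.List.len sommets
    let paysage : List (List Char) :=
      (PySem.List.pyRange 0 (max_el + 1) 1).foldl (fun paysage j =>
        let ligne : List Char :=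
          (PySem.List.pyRange 0 longueur 1).foldl (fun ligne i =>
            -- sommets[i]: i is in range by construction
            let el := PySem.List.pyGetD sommets i 0
            if el < j + 1 then
              ligne ++ PySem.List.pyRepeat [' '] (2 * el)
            else
              ligne ++ PySem.List.pyRepeat [' '] j ++ ['/'] ++
                PySem.List.pyRepeat [' '] (2 * (el - j - 1)) ++ ['\\'] ++
                PySem.List.pyRepeat [' '] j) []
        paysage ++ [PySem.Chars.rstrip ligne]) []
    String.mk (PySem.Chars.join ['\n'] paysage.reverse)

-- ===== PORT B =====
-- grid[j][c] = ch : Python in-place list assignment, ported by hand (exact here: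
-- in pvPlace both indices are nonnegative and in range by construction)
def pvModifyRow (g : List (List Char)) (j : Nat) (f : List Char → List Char) :
    List (List Char) :=
  match g, j with
  | [], _ => []
  | r :: rs, 0 => f r :: rs
  | r :: rs, Nat.succ j => r :: pvModifyRow rs j f

def pvPlace (g : List (List Char)) (off el : Int) : List (List Char) :=
  (PySem.List.pyRange 0 el 1).foldl (fun g j =>
    pvModifyRow (pvModifyRow g j.toNat (fun row => row.set (off + j).toNat '/'))
      j.toNat (fun row => row.set (off + 2 * el - j - 1).toNat '\\')) g

def montagne_commentee_alt (sommets : List Int) : String :=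
  -- max(sommets): Python raises ValueError on []; Pre_ excludes that input
  match PySem.List.max? sommets (fun y => y) with
  | none => ""
  | some max_el =>
    let width : Int :=
      (sommets.filter (fun el => decide (0 < el))).foldl (fun s el => s + 2 * el) 0
    let grid0 : List (List Char) :=
      List.replicate (max_el + 1).toNat (List.replicate width.toNat ' ')
    let res := sommets.foldl (fun (p : List (List Char) × Int) el =>
        (pvPlace p.1 p.2 el, if 0 < el then p.2 + 2 * el else p.2)) (grid0, 0)
    String.mk (PySem.Chars.join ['\n'] (res.1.reverse.map PySem.Chars.rstrip))

-- ===== PRECONDITION & SPEC =====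
-- Python's max([]) raises ValueError, so A (and B) raise on the empty list; Pre_ excludes exactly that input.
def Pre_montagne_commentee (sommets : List Int) : Prop := sommets ≠ []
instance (sommets : List Int) : Decidable (Pre_montagne_commentee sommets) := by
  unfold Pre_montagne_commentee; infer_instance
def pvWitness_montagne_commentee : List Int := [3, 1, 2]

def Spec_montagne_commentee (sommets : List Int) (out : String) : Prop :=
  out = montagne_commentee_alt sommets
instance (sommets : List Int) (out : String) : Decidable (Spec_montagne_commentee sommets out) := by
  unfold Spec_montagne_commentee; infer_instance

-- ===== CLAIM (what is proved, stated in full; the proofs are below) =====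
def Claim_equal_montagne_commentee : Prop :=
  ∀ (sommets : List Int), Dom_montagne_commentee sommets →
    Pre_montagne_commentee sommets →
    Spec_montagne_commentee sommets (montagne_commentee sommets)

-- ===== LEMMAS AND PROOFS =====

/-- The characters peak `el` contributes to row `j` (already padded to the
peak's full column width `(2*el).toNat`, for `0 ≤ j`). -/
def padSeg (j el : Int) : List Char :=
  if el < j + 1 then List.replicate (2 * el).toNat ' '
  else List.replicate j.toNat ' ' ++ '/' ::
    (List.replicate (2 * (el - j - 1)).toNat ' ' ++ '\\' :: List.replicate j.toNat ' ')

/-- Row `j` of the full landscape, unstripped. -/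
def rowRef (sommets : List Int) (j : Int) : List Char := sommets.flatMap (padSeg j)

/-- Total column width of a list of peaks. -/
def W (l : List Int) : Nat := (l.map (fun el => (2 * el).toNat)).sum

lemma length_padSeg (j el : Int) (hj : 0 ≤ j) : (padSeg j el).length = (2 * el).toNat := by
  unfold padSeg
  split <;> simp <;> omega

lemma padSeg_of_le (j el : Int) (hj : 0 ≤ j) (h : el ≤ j) :
    padSeg j el = List.replicate (2 * el).toNat ' ' := by
  unfold padSeg
  rw [if_pos (by omega)]

lemma length_rowRef (l : List Int) (j : Int) (hj : 0 ≤ j) : (rowRef l j).length = W l := by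
  unfold rowRef W
  rw [List.length_flatMap]
  congr 1
  exact List.map_congr_left (fun el _ => length_padSeg j el hj)

lemma rowRef_append (l₁ l₂ : List Int) (j : Int) :
    rowRef (l₁ ++ l₂) j = rowRef l₁ j ++ rowRef l₂ j := by
  unfold rowRef; exact List.flatMap_append

lemma W_append (l₁ l₂ : List Int) : W (l₁ ++ l₂) = W l₁ + W l₂ := by
  unfold W; simp

lemma width_eq_W (l : List Int) : ∀ c : Int,
    (l.filter (fun el => decide (0 < el))).foldl (fun s el => s + 2 * el) c = c + (W l : Int) := by
  induction l with
  | nil => intro c; simp [W]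
  | cons el t ih =>
    intro c
    by_cases h : 0 < el
    · have : (2 * el).toNat = (2 * el).toNat := rfl
      simp only [List.filter_cons, decide_eq_true_eq, if_pos h, List.foldl_cons]
      rw [ih]
      have : W (el :: t) = (2 * el).toNat + W t := by simp [W]
      rw [this]; push_cast; omega
    · simp only [List.filter_cons, decide_eq_true_eq, if_neg h]
      rw [ih]
      have : W (el :: t) = (2 * el).toNat + W t := by simp [W]
      rw [this]
      have : (2 * el).toNat = 0 := by omega
      omega

-- ---- A side ----

lemma inner_eq (sommets : List Int) (j : Int) :
    (PySem.List.pyRange 0 (PySem.List.len sommets) 1).foldl (fun ligne i =>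
      if PySem.List.pyGetD sommets i 0 < j + 1 then
        ligne ++ PySem.List.pyRepeat [' '] (2 * PySem.List.pyGetD sommets i 0)
      else
        ligne ++ PySem.List.pyRepeat [' '] j ++ ['/'] ++
          PySem.List.pyRepeat [' '] (2 * (PySem.List.pyGetD sommets i 0 - j - 1)) ++ ['\\'] ++
          PySem.List.pyRepeat [' '] j) [] = rowRef sommets j := by
  have h1 := PySem.List.foldl_pyRange_zero_pyGetD sommets 0
    (fun ligne el =>
      if el < j + 1 then ligne ++ PySem.List.pyRepeat [' '] (2 * el)
      else ligne ++ PySem.List.pyRepeat [' '] j ++ ['/'] ++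
        PySem.List.pyRepeat [' '] (2 * (el - j - 1)) ++ ['\\'] ++
        PySem.List.pyRepeat [' '] j) ([] : List Char)
  simp only [] at h1 ⊢
  rw [h1]
  have hF : (fun (ligne : List Char) (el : Int) =>
      if el < j + 1 then ligne ++ PySem.List.pyRepeat [' '] (2 * el)
      else ligne ++ PySem.List.pyRepeat [' '] j ++ ['/'] ++
        PySem.List.pyRepeat [' '] (2 * (el - j - 1)) ++ ['\\'] ++
        PySem.List.pyRepeat [' '] j) = (fun ligne el => ligne ++ padSeg j el) := by
    funext ligne el
    simp only [PySem.List.pyRepeat_singleton, padSeg]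
    split <;> simp [List.append_assoc]
  rw [hF, PySem.List.foldl_append_eq_flatMap]
  simp [rowRef]

lemma A_eq (sommets : List Int) (m : Int)
    (hm : PySem.List.max? sommets (fun y => y) = some m) :
    montagne_commentee sommets =
      String.mk (PySem.Chars.join ['\n']
        (((PySem.List.pyRange 0 (m + 1) 1).map
            (fun j => PySem.Chars.rstrip (rowRef sommets j))).reverse)) := by
  unfold montagne_commentee
  rw [hm]
  simp only []
  rw [PySem.List.foldl_append_singleton_eq_map]
  simp only [List.nil_append]
  exact congrArg String.mk (congrArg (PySem.Chars.join ['\n'])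
    (congrArg List.reverse (List.map_congr_left
      (fun j _ => congrArg PySem.Chars.rstrip (inner_eq sommets j)))))

-- ---- B side ----

lemma pvModifyRow_length (g : List (List Char)) (k : Nat) (f : List Char → List Char) :
    (pvModifyRow g k f).length = g.length := by
  induction g generalizing k with
  | nil => rfl
  | cons r rs ih => cases k <;> simp [pvModifyRow, ih]

lemma getElem_pvModifyRow (g : List (List Char)) (k : Nat) (f : List Char → List Char)
    (r : Nat) (hr : r < g.length) :
    (pvModifyRow g k f)[r]'(by rw [pvModifyRow_length]; exact hr) =
      if r = k then f g[r] else g[r] := by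
  induction g generalizing k r with
  | nil => simp at hr
  | cons x xs ih =>
    cases k with
    | zero => cases r <;> simp [pvModifyRow]
    | succ k =>
      cases r with
      | zero => simp [pvModifyRow]
      | succ r => simpa [pvModifyRow] using ih k r (by simpa using hr)

lemma pvModifyRow_map_range (R k : Nat) (w : Nat → List Char) (f : List Char → List Char) :
    pvModifyRow ((List.range R).map w) k f =
      (List.range R).map (fun r => if r = k then f (w r) else w r) := by
  apply List.ext_getElem
  · simp [pvModifyRow_length]
  · intro i h1 h2
    rw [getElem_pvModifyRow _ k f i (by simpa using h2)]
    simp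

lemma row_update (P : List Char) (p jn en n : Nat) (hP : P.length = p) (hj : jn < en) :
    ((P ++ List.replicate (2 * en + n) ' ').set (p + jn) '/').set (p + (2 * en - jn - 1)) '\\' =
      P ++ (List.replicate jn ' ' ++ '/' ::
        (List.replicate (2 * en - 2 * jn - 2) ' ' ++ '\\' :: List.replicate (jn + n) ' ')) := by
  apply List.ext_getElem
  · simp [hP]; omega
  · intro i h1 h2
    simp only [List.getElem_set, List.getElem_append, List.getElem_replicate,
      List.getElem_cons, List.length_set, List.length_append, List.length_replicate,
      List.length_cons, hP]
    split_ifs <;> first | rfl | omega | (exfalso; omega)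

lemma place_aux (off el : Int) (hoff : 0 ≤ off) :
    ∀ (k : Nat) (a : Int), 0 ≤ a → a + k = el →
    ∀ (R : Nat) (pre : Nat → List Char) (n : Nat), (∀ r, (pre r).length = off.toNat) →
    (PySem.List.pyRange a el 1).foldl (fun g j =>
        pvModifyRow (pvModifyRow g j.toNat (fun row => row.set (off + j).toNat '/'))
          j.toNat (fun row => row.set (off + 2 * el - j - 1).toNat '\\'))
      ((List.range R).map (fun (r : Nat) =>
        if (r : Int) < a then pre r ++ padSeg r el ++ List.replicate n ' '
        else pre r ++ List.replicate ((2 * el).toNat + n) ' ')) =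
    (List.range R).map (fun (r : Nat) =>
        if (r : Int) < el then pre r ++ padSeg r el ++ List.replicate n ' '
        else pre r ++ List.replicate ((2 * el).toNat + n) ' ') := by
  intro k
  induction k with
  | zero =>
    intro a ha hak R pre n hpre
    have ha' : a = el := by omega
    subst ha'
    rw [PySem.List.pyRange_one_eq_nil le_rfl]
    simp only [List.foldl_nil]
  | succ k ih =>
    intro a ha hak R pre n hpre
    rw [PySem.List.pyRange_one_cons (by omega : a < el)]
    rw [List.foldl_cons, pvModifyRow_map_range, pvModifyRow_map_range]
    have step : (fun (r : Nat) =>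
        if r = a.toNat then
          (fun row => row.set (off + 2 * el - a - 1).toNat '\\')
            (if r = a.toNat then
              (fun row => row.set (off + a).toNat '/')
                (if (r : Int) < a then pre r ++ padSeg r el ++ List.replicate n ' '
                 else pre r ++ List.replicate ((2 * el).toNat + n) ' ')
             else (if (r : Int) < a then pre r ++ padSeg r el ++ List.replicate n ' '
                 else pre r ++ List.replicate ((2 * el).toNat + n) ' '))
        else (if r = a.toNat then
              (fun row => row.set (off + a).toNat '/')
                (if (r : Int) < a then pre r ++ padSeg r el ++ List.replicate n ' '
                 else pre r ++ List.replicate ((2 * el).toNat + n) ' ')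
             else (if (r : Int) < a then pre r ++ padSeg r el ++ List.replicate n ' '
                 else pre r ++ List.replicate ((2 * el).toNat + n) ' '))) =
        (fun (r : Nat) =>
          if (r : Int) < a + 1 then pre r ++ padSeg r el ++ List.replicate n ' '
          else pre r ++ List.replicate ((2 * el).toNat + n) ' ') := by
      funext r
      by_cases hr : r = a.toNat
      · subst hr
        have hra : ((a.toNat : Nat) : Int) = a := by omega
        rw [if_pos rfl, if_pos rfl, if_neg (by omega), if_pos (by omega)]
        have h2el : (2 * el).toNat = 2 * el.toNat := by omega
        have hcol1 : (off + a).toNat = off.toNat + a.toNat := by omega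
        have hcol2 : (off + 2 * el - a - 1).toNat =
            off.toNat + (2 * el.toNat - a.toNat - 1) := by omega
        rw [h2el, hcol1, hcol2]
        beta_reduce
        rw [row_update (pre a.toNat) off.toNat a.toNat el.toNat n (hpre a.toNat) (by omega)]
        have hseg : padSeg ((a.toNat : Nat) : Int) el =
            List.replicate a.toNat ' ' ++ '/' ::
              (List.replicate (2 * el.toNat - 2 * a.toNat - 2) ' ' ++
                '\\' :: List.replicate a.toNat ' ') := by
          unfold padSeg
          rw [if_neg (by omega)]
          have : (2 * (el - ((a.toNat : Nat) : Int) - 1)).toNat =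
              2 * el.toNat - 2 * a.toNat - 2 := by omega
          rw [this]
          simp only [Int.toNat_natCast]
        rw [hseg]
        simp [List.append_assoc, ← List.replicate_add]
      · rw [if_neg hr, if_neg hr]
        have hne : (r : Int) ≠ a := by omega
        by_cases hlt : (r : Int) < a
        · rw [if_pos hlt, if_pos (by omega)]
        · rw [if_neg hlt, if_neg (by omega)]
    rw [step]
    exact ih (a + 1) (by omega) (by omega) R pre n hpre

lemma pvPlace_spec (el off : Int) (hoff : 0 ≤ off) (R : Nat) (pre : Nat → List Char) (n : Nat)
    (hpre : ∀ r, (pre r).length = off.toNat) :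
    pvPlace ((List.range R).map (fun (r : Nat) => pre r ++ List.replicate ((2 * el).toNat + n) ' ')) off el =
      (List.range R).map (fun (r : Nat) => pre r ++ padSeg r el ++ List.replicate n ' ') := by
  unfold pvPlace
  by_cases hel : el ≤ 0
  · rw [PySem.List.pyRange_one_eq_nil hel]
    simp only [List.foldl_nil]
    apply List.map_congr_left
    intro r _
    have h0 : (2 * el).toNat = 0 := by omega
    rw [padSeg_of_le r el (Int.natCast_nonneg r) (by omega)]
    simp [h0]
  · have key := place_aux off el hoff el.toNat 0 le_rfl (by omega) R pre n hpre
    have e1 : ((List.range R).map (fun (r : Nat) =>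
        if (r : Int) < 0 then pre r ++ padSeg r el ++ List.replicate n ' '
        else pre r ++ List.replicate ((2 * el).toNat + n) ' ')) =
        (List.range R).map (fun (r : Nat) => pre r ++ List.replicate ((2 * el).toNat + n) ' ') :=
      List.map_congr_left (fun r _ => by rw [if_neg (by omega)])
    rw [e1] at key
    rw [key]
    apply List.map_congr_left
    intro r _
    by_cases hr : (r : Int) < el
    · rw [if_pos hr]
    · rw [if_neg hr]
      rw [padSeg_of_le r el (Int.natCast_nonneg r) (by omega)]
      rw [List.append_assoc, ← List.replicate_add]

lemma loop_spec (l : List Int) : ∀ (done : List Int) (R : Nat),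
    l.foldl (fun (p : List (List Char) × Int) el =>
        (pvPlace p.1 p.2 el, if 0 < el then p.2 + 2 * el else p.2))
      ((List.range R).map (fun (r : Nat) => rowRef done r ++ List.replicate (W l) ' '), (W done : Int)) =
    ((List.range R).map (fun (r : Nat) => rowRef (done ++ l) r), (W (done ++ l) : Int)) := by
  induction l with
  | nil =>
    intro done R
    simp [W]
  | cons el t ih =>
    intro done R
    rw [List.foldl_cons]
    have hW : W (el :: t) = (2 * el).toNat + W t := by simp [W]
    have hgrid : pvPlace ((List.range R).map (fun (r : Nat) =>
          rowRef done r ++ List.replicate (W (el :: t)) ' ')) (W done : Int) el =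
        (List.range R).map (fun (r : Nat) => rowRef (done ++ [el]) r ++ List.replicate (W t) ' ') := by
      rw [hW]
      rw [pvPlace_spec el (W done : Int) (Int.natCast_nonneg _) R
        (fun r => rowRef done r) (W t)
        (fun r => by rw [length_rowRef done r (Int.natCast_nonneg r)]; omega)]
      apply List.map_congr_left
      intro r _
      rw [rowRef_append]
      simp [rowRef, List.append_assoc]
    have hoff2 : (if 0 < el then (W done : Int) + 2 * el else (W done : Int)) =
        (W (done ++ [el]) : Int) := by
      rw [W_append]
      have h1 : W [el] = (2 * el).toNat := by simp [W]
      rw [h1]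
      split_ifs <;> push_cast <;> omega
    simp only [hgrid, hoff2]
    have := ih (done ++ [el]) R
    simpa [List.append_assoc] using this

lemma B_eq (sommets : List Int) (m : Int)
    (hm : PySem.List.max? sommets (fun y => y) = some m) :
    montagne_commentee_alt sommets =
      String.mk (PySem.Chars.join ['\n']
        (((PySem.List.pyRange 0 (m + 1) 1).map
            (fun j => PySem.Chars.rstrip (rowRef sommets j))).reverse)) := by
  unfold montagne_commentee_alt
  rw [hm]
  simp only []
  have hwidth : ((sommets.filter (fun el => decide (0 < el))).foldl
      (fun s el => s + 2 * el) 0) = (W sommets : Int) := by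
    simpa using width_eq_W sommets 0
  have hgrid0 : List.replicate (m + 1).toNat
        (List.replicate ((sommets.filter (fun el => decide (0 < el))).foldl
          (fun s el => s + 2 * el) 0).toNat ' ') =
      (List.range (m + 1).toNat).map (fun (r : Nat) =>
        rowRef [] r ++ List.replicate (W sommets) ' ') := by
    rw [hwidth, Int.toNat_natCast]
    simp [rowRef]
  rw [hgrid0]
  have key := loop_spec sommets [] (m + 1).toNat
  rw [show ((W [] : Nat) : Int) = 0 from by simp [W]] at key
  rw [key]
  simp only [List.nil_append]
  rw [PySem.List.pyRange_one]
  simp [List.map_reverse, List.map_map, Function.comp_def]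

-- ===== VERDICT (by name: the statement is the Claim_ definition above) =====
theorem montagne_commentee_spec : Claim_equal_montagne_commentee := by
  intro sommets _ hpre
  unfold Spec_montagne_commentee
  cases hm : PySem.List.max? sommets (fun y => y) with
  | none => exact absurd ((PySem.List.max?_eq_none_iff sommets (fun y => y)).1 hm) hpre
  | some m => rw [A_eq sommets m hm, B_eq sommets m hm]
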